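-- pv_equiv track=rewrite | github.com/KKainz/Uebungen | UE 3/1 - duplikate.py | duplikate
-- ===== SOURCE A (Python) =====
-- from typing import Dict, List, Tuple, Set
--
-- def duplikate(liste: List[List[int]]) -> List[bool]:
--     dup = []
--     for i in range(len(liste)):
--         teilliste = set(liste[i])
--         if len(liste[i]) == len(teilliste):
--             dup.append(False)
--         else:
--             dup.append(True)
--     return dup
-- ===== SOURCE B (Python) =====
-- def duplikate(liste):
--     out = []
--     for sub in liste:
--         s = sorted(sub)
--         out.append(any(x == y for x, y in zip(s, s[1:])))
--     return out
-- ===== Notes on version B (the rewrite author's own statement) =====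
-- stated objective: alternative
-- what changed: Replaces the set-construction-and-length-comparison per sublist with a sort-then-adjacent-equal scan (sorted copy, compare neighbours via zip).
import Mathlib
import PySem

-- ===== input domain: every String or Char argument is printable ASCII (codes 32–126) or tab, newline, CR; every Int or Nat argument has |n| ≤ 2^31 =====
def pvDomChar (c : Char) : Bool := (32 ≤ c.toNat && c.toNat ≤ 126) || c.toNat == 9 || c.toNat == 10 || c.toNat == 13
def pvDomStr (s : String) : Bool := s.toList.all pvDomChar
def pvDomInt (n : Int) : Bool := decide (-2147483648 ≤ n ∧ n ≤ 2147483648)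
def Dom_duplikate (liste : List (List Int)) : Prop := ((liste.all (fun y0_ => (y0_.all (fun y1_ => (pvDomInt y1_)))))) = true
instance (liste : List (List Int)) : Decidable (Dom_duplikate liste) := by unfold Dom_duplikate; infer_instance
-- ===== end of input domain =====

-- B replaces A's per-sublist set-construction-and-length-comparison with a sort-then-adjacent-equal
-- scan (alternative decomposition, similar cost).


-- ===== PORT A =====
def duplikate (liste : List (List Int)) : List Bool :=
  (PySem.List.pyRange 0 (PySem.List.len liste) 1).foldl
    (fun dup i =>
      let teilliste := PySem.Set.ofList (PySem.List.pyGetD liste i [])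
      if PySem.List.len (PySem.List.pyGetD liste i []) == PySem.Set.len teilliste then
        dup ++ [false]
      else
        dup ++ [true])
    []

-- ===== PORT B =====
def duplikate_alt (liste : List (List Int)) : List Bool :=
  liste.foldl
    (fun out sub =>
      let s := PySem.List.sorted sub (fun x => x) false
      out ++ [(s.zip (PySem.List.slice s (some 1) none)).any (fun p => p.1 == p.2)])
    []

-- ===== PRECONDITION & SPEC =====
def Spec_duplikate (liste : List (List Int)) (out : List Bool) : Prop := out = duplikate_alt liste
instance (liste : List (List Int)) (out : List Bool) : Decidable (Spec_duplikate liste out) := by unfold Spec_duplikate; infer_instance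

-- ===== CLAIM (what is proved, stated in full; the proofs are below) =====
def Claim_equal_duplikate : Prop := ∀ (liste : List (List Int)), Dom_duplikate liste → Spec_duplikate liste (duplikate liste)

-- ===== LEMMAS AND PROOFS =====

-- len(set(xs)) == len(xs) exactly when xs has no duplicates.
theorem pv_len_ofList_eq_iff (xs : List Int) :
    (PySem.Set.ofList xs).length = xs.length ↔ xs.Nodup := by
  constructor
  · intro h
    have hn := PySem.Set.nodup_ofList xs
    have hfin : (PySem.Set.ofList xs).toFinset = xs.toFinset := by
      ext y
      simp [List.mem_toFinset, PySem.Set.mem_ofList]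
    have h1 : xs.toFinset.card = xs.length := by
      rw [← hfin, List.toFinset_card_of_nodup hn, h]
    exact Multiset.toFinset_card_eq_card_iff_nodup.mp h1
  · intro h
    rw [PySem.Set.ofList_eq_self_of_nodup xs h]

-- the slice s[1:] is drop 1
theorem pv_slice_one (s : List Int) : PySem.List.slice s (some 1) none = s.drop 1 := by
  rw [PySem.List.slice_some_none]
  cases s <;> simp [PySem.List.clampIdx]

-- adjacent-equal scan on a ≤-sorted list detects exactly non-Nodup
theorem pv_any_adj_iff (l : List Int) (hp : l.Pairwise (fun a b => a ≤ b)) :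
    ((l.zip (l.drop 1)).any (fun p => p.1 == p.2) = true) ↔ ¬ l.Nodup := by
  induction l with
  | nil => simp
  | cons a t ih =>
    cases t with
    | nil => simp
    | cons b t' =>
      have hp' : (b :: t').Pairwise (fun a b => a ≤ b) := hp.of_cons
      have hab : a ≤ b := (List.pairwise_cons.mp hp).1 b (by simp)
      by_cases hEq : a = b
      · subst hEq
        constructor
        · intro _
          simp [List.Nodup]
        · intro _
          simp
      · have hnotmem : a ∉ b :: t' := by
          intro hmem
          have hba : b ≤ a := by
            rcases List.mem_cons.mp hmem with h | h
            · exact le_of_eq h.symm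
            · exact List.rel_of_pairwise_cons hp' h
          exact hEq (le_antisymm hab hba)
        have hzip : ((a :: b :: t').zip ((a :: b :: t').drop 1)).any (fun p => p.1 == p.2)
            = ((b :: t').zip ((b :: t').drop 1)).any (fun p => p.1 == p.2) := by
          simp [hEq]
        rw [hzip, ih hp']
        constructor
        · intro h hn
          exact h hn.of_cons
        · intro h hn
          exact h (List.nodup_cons.mpr ⟨hnotmem, hn⟩)

-- the per-sublist value of A equals the per-sublist value of B
theorem pv_point (sub : List Int) :
    (if PySem.List.len sub == PySem.Set.len (PySem.Set.ofList sub) then false else true)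
      = ((PySem.List.sorted sub (fun x => x) false).zip
          (PySem.List.slice (PySem.List.sorted sub (fun x => x) false) (some 1) none)).any
          (fun p => p.1 == p.2) := by
  rw [pv_slice_one]
  have hB := pv_any_adj_iff (PySem.List.sorted sub (fun x => x) false)
    (PySem.List.sorted_pairwise sub (fun x => x))
  have hperm := PySem.List.sorted_perm sub (fun x => x) false
  have hNd : (PySem.List.sorted sub (fun x => x) false).Nodup ↔ sub.Nodup := hperm.nodup_iff
  by_cases h : sub.Nodup
  · have hlen : PySem.List.len sub == PySem.Set.len (PySem.Set.ofList sub) := by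
      simp [PySem.List.len, PySem.Set.len, (pv_len_ofList_eq_iff sub).mpr h]
    rw [if_pos hlen]
    by_contra hne
    have := hB.mp (by simpa using (Bool.not_eq_false _).mp (fun hf => hne hf.symm))
    exact this (hNd.mpr h)
  · have hlen : ¬ (PySem.List.len sub == PySem.Set.len (PySem.Set.ofList sub)) = true := by
      simp only [PySem.List.len, PySem.Set.len, beq_iff_eq]
      intro hc
      exact h ((pv_len_ofList_eq_iff sub).mp (by exact_mod_cast hc.symm))
    rw [if_neg hlen]
    exact (hB.mpr (fun hn => h (hNd.mp hn))).symm

-- foldl with an appended singleton is map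
theorem pv_foldl_append_map {α : Type} (g : α → Bool) :
    ∀ (l : List α) (acc : List Bool),
      l.foldl (fun dup x => dup ++ [g x]) acc = acc ++ l.map g := by
  intro l
  induction l with
  | nil => simp
  | cons x t ih => intro acc; simp [List.foldl, ih]

-- ===== VERDICT (by name: the statement is the Claim_ definition above) =====
theorem duplikate_spec : Claim_equal_duplikate := by
  intro liste _
  unfold Spec_duplikate duplikate duplikate_alt
  rw [PySem.List.foldl_pyRange_zero_pyGetD liste []
    (fun dup sub =>
      if PySem.List.len sub == PySem.Set.len (PySem.Set.ofList sub) then dup ++ [false]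
      else dup ++ [true]) []]
  have hA :
      (fun (dup : List Bool) (sub : List Int) =>
        if PySem.List.len sub == PySem.Set.len (PySem.Set.ofList sub) then dup ++ [false]
        else dup ++ [true])
      = fun dup sub => dup ++
          [if PySem.List.len sub == PySem.Set.len (PySem.Set.ofList sub) then false else true] := by
    funext dup sub
    split <;> rfl
  rw [hA, pv_foldl_append_map, pv_foldl_append_map]
  simp only [List.nil_append]
  exact List.map_congr_left (fun sub _ => pv_point sub)
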